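-- pv_equiv track=rewrite | github.com/wjddn279/Algorithms | Programmers/숫자 게임.py | solution
-- ===== SOURCE A (Python) =====
-- def solution(A, B):
--     answer = 0
--     A.sort()
--     B.sort()
--     a, b = 0 ,0
--     while a < len(A) and b < len(B):
--         if A[a] >= B[b]:
--             b += 1
--         else:
--             a += 1
--             b += 1
--             answer += 1
--     return answer
-- ===== SOURCE B (Python) =====
-- def solution(A, B):
--     # Binary search on the answer instead of a greedy scan: k wins are
--     # achievable iff each of the k largest B elements beats the matching one
--     # of the k smallest A elements, and that predicate is monotone in k.
--     A.sort()
--     B.sort()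
--     n, m = len(A), len(B)
--
--     def wins(k):
--         return all(B[m - k + i] > A[i] for i in range(k))
--
--     lo, hi = 0, min(n, m)
--     while lo < hi:
--         mid = (lo + hi + 1) // 2
--         if wins(mid):
--             lo = mid
--         else:
--             hi = mid - 1
--     return lo
-- ===== Notes on version B (the rewrite author's own statement) =====
-- stated objective: alternative
-- what changed: The two-pointer greedy scan is replaced by a binary search on the answer k, using the monotone feasibility predicate 'each of the k largest B elements beats the matching one of the k smallest A elements'; both sorts stay in place.
import Mathlib
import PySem

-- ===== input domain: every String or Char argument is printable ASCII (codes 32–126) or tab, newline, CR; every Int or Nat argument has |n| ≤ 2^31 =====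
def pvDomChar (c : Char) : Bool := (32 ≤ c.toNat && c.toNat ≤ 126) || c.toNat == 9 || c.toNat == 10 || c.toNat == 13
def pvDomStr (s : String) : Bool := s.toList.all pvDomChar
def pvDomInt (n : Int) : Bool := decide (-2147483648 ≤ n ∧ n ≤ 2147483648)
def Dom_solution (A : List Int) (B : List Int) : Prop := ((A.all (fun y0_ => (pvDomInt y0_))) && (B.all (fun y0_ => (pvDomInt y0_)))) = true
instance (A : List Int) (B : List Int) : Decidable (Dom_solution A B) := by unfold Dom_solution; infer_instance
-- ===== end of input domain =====

-- B replaces A's two-pointer greedy scan by a binary search on the answer k with the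
-- monotone feasibility predicate "each of the k largest B elements beats the matching one
-- of the k smallest A elements" (objective: alternative, same cost). Both Pythons sort A
-- and B in place; the equivalence proved here is about the RETURN value (the mutation is
-- identical).

-- ===== PORT A =====
-- the while loop over indices a, b on the sorted lists, as structural recursion on
-- the suffixes A[a:], B[b:]; 'answer += 1' becomes the leading '1 +'
def pvLoopA : List Int → List Int → Int
  | x :: As, y :: Bs => if x ≥ y then pvLoopA (x :: As) Bs else 1 + pvLoopA As Bs
  | _, _ => 0
termination_by As Bs => As.length + Bs.length
decreasing_by all_goals (simp_all; try omega)

def solution (A : List Int) (B : List Int) : Int :=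
  pvLoopA (PySem.List.sorted A (fun x => x) false) (PySem.List.sorted B (fun x => x) false)

-- ===== PORT B =====
-- wins(k) = all(B[m - k + i] > A[i] for i in range(k)); with 0 ≤ k ≤ min(n, m) every
-- index is in range, so Python's B[m-k+i] / A[i] are exactly getD with a dummy default
def pvWins (SA SB : List Int) (k : Nat) : Bool :=
  (List.range k).all (fun i => decide (SB.getD (SB.length - k + i) 0 > SA.getD i 0))

-- the 'while lo < hi' binary-search loop; lo, hi are the nonnegative Python ints
def pvBS (SA SB : List Int) (lo hi : Nat) : Nat :=
  if lo < hi then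
    if pvWins SA SB ((lo + hi + 1) / 2) then pvBS SA SB ((lo + hi + 1) / 2) hi
    else pvBS SA SB lo ((lo + hi + 1) / 2 - 1)
  else lo
termination_by hi - lo
decreasing_by all_goals omega

def solution_alt (A : List Int) (B : List Int) : Int :=
  let SA := PySem.List.sorted A (fun x => x) false
  let SB := PySem.List.sorted B (fun x => x) false
  ↑(pvBS SA SB 0 (min SA.length SB.length))

-- ===== PRECONDITION & SPEC =====
def Spec_solution (A : List Int) (B : List Int) (out : Int) : Prop := out = solution_alt A B
instance (A : List Int) (B : List Int) (out : Int) : Decidable (Spec_solution A B out) := by unfold Spec_solution; infer_instance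

-- ===== CLAIM (what is proved, stated in full; the proofs are below) =====
def Claim_equal_solution : Prop := ∀ (A : List Int) (B : List Int), Dom_solution A B → Spec_solution A B (solution A B)

-- ===== LEMMAS AND PROOFS =====

-- Nat-valued mirror of A's loop, used for all counting arguments
def gN : List Int → List Int → Nat
  | x :: As, y :: Bs => if x ≥ y then gN (x :: As) Bs else 1 + gN As Bs
  | _, _ => 0
termination_by As Bs => As.length + Bs.length
decreasing_by all_goals (simp_all; try omega)

theorem pvLoopA_eq_gN (A B : List Int) : pvLoopA A B = ↑(gN A B) := by
  fun_induction gN A B with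
  | case1 x As y Bs h ih => simp [pvLoopA, h, ih]
  | case2 x As y Bs h ih => simp [pvLoopA, h, ih]
  | case3 A B h =>
      cases A <;> cases B <;> simp [pvLoopA]
      exact (h _ _ _ _ rfl rfl).elim

theorem gN_nil_right (A : List Int) : gN A [] = 0 := by
  cases A <;> simp [gN]

theorem gN_nil_left (B : List Int) : gN [] B = 0 := by
  cases B <;> simp [gN]

-- against a single a, the greedy scores 0 when every b ≤ a …
theorem gN_single_zero (a : Int) (B : List Int) (h : ∀ y ∈ B, y ≤ a) :
    gN [a] B = 0 := by
  induction B with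
  | nil => simp [gN]
  | cons y Bs ih =>
      have hy : y ≤ a := h y (by simp)
      simp only [gN, if_pos (by omega : a ≥ y)]
      exact ih (fun z hz => h z (by simp [hz]))

-- … and 1 as soon as some b > a
theorem gN_single_one (a : Int) (B : List Int) (h : ∃ y ∈ B, a < y) :
    gN [a] B = 1 := by
  induction B with
  | nil => simp at h
  | cons y Bs ih =>
      by_cases hy : a ≥ y
      · simp only [gN, if_pos hy]
        apply ih
        rcases h with ⟨z, hz, hza⟩
        rcases List.mem_cons.mp hz with rfl | hz'
        · omega
        · exact ⟨z, hz', hza⟩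
      · simp [gN, if_neg hy, gN_nil_left]

-- dropping the largest A element when the largest B cannot beat it
theorem gN_drop_last (A' B' : List Int) (a b : Int) (hba : b ≤ a)
    (hA : (A' ++ [a]).Pairwise (· ≤ ·)) (hB : (B' ++ [b]).Pairwise (· ≤ ·)) :
    gN (A' ++ [a]) (B' ++ [b]) = gN A' (B' ++ [b]) := by
  induction A' generalizing B' with
  | nil =>
      simp only [List.nil_append]
      rw [gN_single_zero]
      · simp [gN_nil_left]
      · intro y hy
        rcases List.mem_append.mp hy with hy' | hy'
        · have := (List.pairwise_append.mp hB).2.2 y hy' b (by simp)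
          omega
        · simp at hy'; omega
  | cons x A₁ ihA =>
      induction B' generalizing x with
      | nil =>
          simp only [List.nil_append]
          by_cases hxb : x ≥ b
          · simp only [List.cons_append, gN, if_pos hxb, gN_nil_right]
          · simp only [List.cons_append, gN, if_neg hxb, gN_nil_right]
      | cons y B₁ ihB =>
          by_cases hxy : x ≥ y
          · simp only [List.cons_append, gN, if_pos hxy]
            exact ihB x hA hB.of_cons
          · simp only [List.cons_append, gN, if_neg hxy]
            rw [ihA B₁ hA.of_cons hB.of_cons]

-- matching the two largest elements when the largest B beats the largest A
theorem gN_match_last (A' B' : List Int) (a b : Int) (hab : a < b)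
    (hA : (A' ++ [a]).Pairwise (· ≤ ·)) (hB : (B' ++ [b]).Pairwise (· ≤ ·)) :
    gN (A' ++ [a]) (B' ++ [b]) = 1 + gN A' B' := by
  induction A' generalizing B' with
  | nil =>
      simp only [List.nil_append]
      rw [gN_single_one a (B' ++ [b]) ⟨b, by simp, hab⟩]
      simp [gN_nil_left]
  | cons x A₁ ihA =>
      induction B' generalizing x with
      | nil =>
          have hxa : x ≤ a := (List.pairwise_append.mp hA).2.2 x (by simp) a (by simp)
          simp only [List.nil_append, List.cons_append, gN,
            if_neg (by omega : ¬ x ≥ b), gN_nil_right]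
      | cons y B₁ ihB =>
          by_cases hxy : x ≥ y
          · simp only [List.cons_append, gN, if_pos hxy]
            exact ihB x hA hB.of_cons
          · simp only [List.cons_append, gN, if_neg hxy]
            rw [ihA B₁ hA.of_cons hB.of_cons]

-- the feasibility predicate, in Prop form
def WinsP (A B : List Int) (k : Nat) : Prop :=
  ∀ i < k, A.getD i 0 < B.getD (B.length - k + i) 0

theorem pvWins_eq_true_iff (A B : List Int) (k : Nat) :
    pvWins A B k = true ↔ WinsP A B k := by
  simp [pvWins, WinsP, List.all_eq_true]

-- the triple of greedy facts for an empty side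
theorem gN_facts_zero_left (B : List Int) :
    gN [] B ≤ min ([] : List Int).length B.length ∧ WinsP [] B (gN [] B) ∧
      (∀ k ≤ min ([] : List Int).length B.length, WinsP [] B k → k ≤ gN [] B) := by
  refine ⟨by simp [gN_nil_left], ?_, ?_⟩
  · intro i hi
    simp [gN_nil_left] at hi
  · intro k hk _
    simp at hk
    simp [hk, gN_nil_left]

theorem gN_facts_zero_right (A : List Int) :
    gN A [] ≤ min A.length ([] : List Int).length ∧ WinsP A [] (gN A []) ∧
      (∀ k ≤ min A.length ([] : List Int).length, WinsP A [] k → k ≤ gN A []) := by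
  refine ⟨by simp [gN_nil_right], ?_, ?_⟩
  · intro i hi
    simp [gN_nil_right] at hi
  · intro k hk _
    simp at hk
    simp [hk, gN_nil_right]

-- the three greedy facts, proved together by strong induction on total length:
-- the greedy count never exceeds min(n, m), it is feasible, and it bounds every feasible k
theorem gN_facts : ∀ (N : Nat) (A B : List Int), A.length + B.length ≤ N →
    A.Pairwise (· ≤ ·) → B.Pairwise (· ≤ ·) →
    gN A B ≤ min A.length B.length ∧ WinsP A B (gN A B) ∧
      (∀ k ≤ min A.length B.length, WinsP A B k → k ≤ gN A B) := by
  intro N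
  induction N with
  | zero =>
      intro A B hlen _ _
      have hA0 : A = [] := List.length_eq_zero_iff.mp (by omega)
      subst hA0
      exact gN_facts_zero_left B
  | succ N ih =>
      intro A B hlen hA hB
      rcases List.eq_nil_or_concat' A with rfl | ⟨A', a, rfl⟩
      · exact gN_facts_zero_left B
      rcases List.eq_nil_or_concat' B with rfl | ⟨B', b, rfl⟩
      · exact gN_facts_zero_right (A' ++ [a])
      -- notation
      have ha_max : ∀ x ∈ A', x ≤ a := by
        intro x hx
        exact (List.pairwise_append.mp hA).2.2 x hx a (by simp)
      have hA' : A'.Pairwise (· ≤ ·) := (List.pairwise_append.mp hA).1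
      have hB' : B'.Pairwise (· ≤ ·) := (List.pairwise_append.mp hB).1
      have hlenA : (A' ++ [a]).length = A'.length + 1 := by simp
      have hlenB : (B' ++ [b]).length = B'.length + 1 := by simp
      by_cases hba : b ≤ a
      · -- the largest A element is never beaten: drop it
        have hrec : gN (A' ++ [a]) (B' ++ [b]) = gN A' (B' ++ [b]) :=
          gN_drop_last A' B' a b hba hA hB
        obtain ⟨ih1, ih2, ih3⟩ := ih A' (B' ++ [b]) (by simp at hlen ⊢; omega) hA' hB
        refine ⟨?_, ?_, ?_⟩
        · rw [hrec]; simp at ih1 ⊢; omega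
        · rw [hrec]
          intro i hi
          have hin : i < A'.length := by simp at ih1; omega
          rw [List.getD_append _ _ _ _ hin]
          exact ih2 i hi
        · intro k hk hw
          rw [hrec]
          by_cases hkn : k ≤ A'.length
          · apply ih3 k (by simp at hk ⊢; omega)
            intro i hi
            have := hw i hi
            rwa [List.getD_append _ _ _ _ (by omega)] at this
          · -- k = A'.length + 1: position A'.length pairs a against b, impossible
            exfalso
            have hk1 : k = A'.length + 1 := by simp at hk; omega
            have := hw A'.length (by omega)
            have hga : (A' ++ [a]).getD A'.length 0 = a := by
              rw [List.getD_append_right _ _ _ _ (le_refl _)]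
              simp
            have hgb : (B' ++ [b]).getD ((B' ++ [b]).length - k + A'.length) 0 = b := by
              have hidx : (B' ++ [b]).length - k + A'.length = B'.length := by
                simp at hk ⊢; omega
              rw [hidx, List.getD_append_right _ _ _ _ (le_refl _)]
              simp
            rw [hga, hgb] at this
            omega
      · -- the largest B element beats the largest A element: match them
        have hab : a < b := by omega
        have hrec : gN (A' ++ [a]) (B' ++ [b]) = 1 + gN A' B' :=
          gN_match_last A' B' a b hab hA hB
        obtain ⟨ih1, ih2, ih3⟩ := ih A' B' (by simp at hlen ⊢; omega) hA' hB'
        refine ⟨?_, ?_, ?_⟩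
        · rw [hrec]; simp at ih1 ⊢; omega
        · rw [hrec]
          intro i hi
          have hg0 : gN A' B' ≤ min A'.length B'.length := ih1
          by_cases hig : i < gN A' B'
          · -- a pair below the top: exactly the pair of the smaller instance
            have hiA : i < A'.length := by omega
            have hidx : (B' ++ [b]).length - (1 + gN A' B') + i < B'.length := by
              simp; omega
            rw [List.getD_append _ _ _ _ hiA, List.getD_append _ _ _ _ hidx]
            have := ih2 i hig
            have heq : (B' ++ [b]).length - (1 + gN A' B') + i
                = B'.length - gN A' B' + i := by simp; omega
            rwa [heq]
          · -- the new top pair: some A element ≤ a < b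
            have hieq : i = gN A' B' := by omega
            have hgb : (B' ++ [b]).getD ((B' ++ [b]).length - (1 + gN A' B') + i) 0 = b := by
              have hidx : (B' ++ [b]).length - (1 + gN A' B') + i = B'.length := by
                simp; omega
              rw [hidx, List.getD_append_right _ _ _ _ (le_refl _)]
              simp
            rw [hgb]
            have hle : (A' ++ [a]).getD i 0 ≤ a := by
              by_cases hiA : i < A'.length
              · rw [List.getD_append _ _ _ _ hiA]
                rw [List.getD_eq_getElem _ _ hiA]
                exact ha_max _ (List.getElem_mem hiA)
              · have : i = A'.length := by omega
                rw [this, List.getD_append_right _ _ _ _ (le_refl _)]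
                simp
            omega
        · intro k hk hw
          rw [hrec]
          rcases Nat.eq_zero_or_pos k with rfl | hkpos
          · omega
          have hk1 : k - 1 ≤ min A'.length B'.length := by simp at hk ⊢; omega
          have : k - 1 ≤ gN A' B' := by
            apply ih3 (k - 1) hk1
            intro i hi
            have := hw i (by omega)
            have hiA : i < A'.length := by simp at hk1; omega
            rw [List.getD_append _ _ _ _ hiA] at this
            have hidx : (B' ++ [b]).length - k + i < B'.length := by simp at hk; omega
            rw [List.getD_append _ _ _ _ hidx] at this
            have heq : (B' ++ [b]).length - k + i = B'.length - (k - 1) + i := by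
              simp at hk ⊢; omega
            rwa [heq] at this
          omega

-- a sorted list is monotone under getD on in-range indices
theorem sorted_getD_mono (B : List Int) (hB : B.Pairwise (· ≤ ·)) {i j : Nat}
    (hij : i ≤ j) (hj : j < B.length) : B.getD i 0 ≤ B.getD j 0 := by
  rcases Nat.lt_or_eq_of_le hij with h | h
  · rw [List.getD_eq_getElem _ _ (by omega), List.getD_eq_getElem _ _ hj]
    exact List.pairwise_iff_getElem.mp hB i j (by omega) hj h
  · rw [h]

-- feasibility is monotone downward in k (for sorted B)
theorem WinsP_mono (A B : List Int) (hB : B.Pairwise (· ≤ ·)) {k1 k2 : Nat}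
    (h12 : k1 ≤ k2) (h2m : k2 ≤ B.length) (hw : WinsP A B k2) : WinsP A B k1 := by
  intro i hi
  have h := hw i (by omega)
  have hmono : B.getD (B.length - k2 + i) 0 ≤ B.getD (B.length - k1 + i) 0 :=
    sorted_getD_mono B hB (by omega) (by omega)
  omega

-- binary search returns g when wins is true up to g and false beyond it (up to cap)
theorem pvBS_eq (SA SB : List Int) (g cap : Nat)
    (Htrue : ∀ k ≤ g, pvWins SA SB k = true)
    (Hfalse : ∀ k ≤ cap, pvWins SA SB k = true → k ≤ g) :
    ∀ (d lo hi : Nat), hi - lo ≤ d → lo ≤ g → g ≤ hi → hi ≤ cap →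
      pvBS SA SB lo hi = g := by
  intro d
  induction d with
  | zero =>
      intro lo hi hd hlo hhi hcap
      rw [pvBS, if_neg (by omega : ¬ lo < hi)]
      omega
  | succ d ihd =>
      intro lo hi hd hlo hhi hcap
      by_cases h : lo < hi
      · rw [pvBS, if_pos h]
        have hm1 : lo < (lo + hi + 1) / 2 := by omega
        have hm2 : (lo + hi + 1) / 2 ≤ hi := by omega
        by_cases hw : pvWins SA SB ((lo + hi + 1) / 2) = true
        · rw [if_pos hw]
          exact ihd _ hi (by omega) (Hfalse _ (by omega) hw) hhi hcap
        · rw [if_neg hw]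
          have hgm : g < (lo + hi + 1) / 2 := by
            by_contra h'
            exact hw (Htrue _ (by omega))
          exact ihd lo _ (by omega) hlo (by omega) (by omega)
      · rw [pvBS, if_neg h]
        omega

-- ===== VERDICT (by name: the statement is the Claim_ definition above) =====
theorem solution_spec : Claim_equal_solution := by
  intro A B _
  show solution A B = solution_alt A B
  unfold solution solution_alt
  have hsa : (PySem.List.sorted A (fun x => x) false).Pairwise (· ≤ ·) := by
    simpa using PySem.List.sorted_pairwise (xs := A) (key := fun x => x)
  have hsb : (PySem.List.sorted B (fun x => x) false).Pairwise (· ≤ ·) := by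
    simpa using PySem.List.sorted_pairwise (xs := B) (key := fun x => x)
  obtain ⟨h1, h2, h3⟩ :=
    gN_facts ((PySem.List.sorted A (fun x => x) false).length +
        (PySem.List.sorted B (fun x => x) false).length)
      (PySem.List.sorted A (fun x => x) false)
      (PySem.List.sorted B (fun x => x) false) le_rfl hsa hsb
  rw [pvLoopA_eq_gN]
  congr 1
  refine (pvBS_eq _ _ _ _ ?_ (fun k hk hw => h3 k hk ((pvWins_eq_true_iff _ _ _).mp hw))
    _ 0 _ le_rfl (Nat.zero_le _) h1 le_rfl).symm
  intro k hk
  exact (pvWins_eq_true_iff _ _ _).mpr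
    (WinsP_mono _ _ hsb hk (by omega) h2)
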